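-- pv_equiv track=rewrite | github.com/NameSirname/my_homework | gray_ints.py | g_down
-- ===== SOURCE A (Python) =====
-- def g_down(n):
--     q,l = len(n),0
--     n ='0'+n
--     t,k=0,0
--     if n[q]=='0':
--         t,k=1,1
--     for e in range(1,q):
--         l+= int(n[q-e])
--         if t and n[q-e]=='0':
--             k+=1
--         else:
--             t=0
--     l=l%2
--
--     if l and k:
--         n= n[1:-1]+'1'
--     elif not l and not k:
--         n= n[1:-1]+'0'
--     else:
--         n=n[1:-k-2]+ str(1-int(n[-k-2]))+n[-k-1:]
--     if len(n)>1 and n[0]=='0':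
--         n=n[1:]
--     return n
-- ===== SOURCE B (Python) =====
-- def g_down(n):
--     if any(c not in '01' for c in n):
--         raise ValueError('g_down: not a Gray-code string')
--     # Recursive reflected-Gray-code decrement: peel bits from the left, using the
--     # mirror symmetry of the Gray code (decrement under a leading 1 is an
--     # increment of the tail), instead of A's parity/trailing-zero flip search.
--     def is_boundary(t):
--         # t encodes the reflection boundary value 2^(len(t)-1), i.e. '1' followed by zeros
--         return t[0] == '1' and all(c == '0' for c in t[1:])
--
--     def dec(s):
--         if len(s) == 1:
--             return '0'
--         if s[0] == '0':
--             return '0' + dec(s[1:])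
--         t = s[1:]
--         return '0' + t if is_boundary(t) else '1' + inc(t)
--
--     def inc(s):
--         if len(s) == 1:
--             return '1'
--         if s[0] == '1':
--             return '1' + dec(s[1:])
--         t = s[1:]
--         return '1' + t if is_boundary(t) else '0' + inc(t)
--
--     s = dec(n)
--     if len(s) > 1 and s[0] == '0':
--         s = s[1:]
--     return s
-- ===== Notes on version B (the rewrite author's own statement) =====
-- stated objective: alternative
-- what changed: Replaces A's backward parity/trailing-zero scan with three-way slice surgery by a structural recursion on the reflected Gray code: bits are peeled from the left and a decrement under a leading 1 becomes an increment of the tail (mutual dec/inc), followed by the same one-leading-zero trim.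
-- outside the precondition, e.g. on g_down('12'): A returns '2', B raises ValueError; on g_down('00'): A raises IndexError, B returns '0'; on g_down('0'): A raises IndexError, B returns '0'
import Mathlib
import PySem

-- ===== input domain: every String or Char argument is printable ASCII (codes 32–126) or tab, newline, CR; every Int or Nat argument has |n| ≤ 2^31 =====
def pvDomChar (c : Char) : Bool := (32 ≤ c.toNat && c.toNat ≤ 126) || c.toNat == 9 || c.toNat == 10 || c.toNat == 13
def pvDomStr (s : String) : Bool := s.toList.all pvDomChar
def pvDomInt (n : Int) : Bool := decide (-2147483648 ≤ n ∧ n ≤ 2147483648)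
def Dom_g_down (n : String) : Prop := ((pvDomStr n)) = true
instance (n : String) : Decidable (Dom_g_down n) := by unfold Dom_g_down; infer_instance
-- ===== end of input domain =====

-- B replaces A's backward parity/trailing-zero scan by a structural mutual
-- dec/inc recursion on the reflected Gray code (alternative algorithm, same results).


-- ===== PORT A =====
-- one loop step of A's 'for e in range(1, q)' (state (l, t, k)); int(n[q-e]) is
-- PySem.Int.ofChars? (getD 0 is unreachable: ValueError inputs are outside Pre_)
def gdStepA (n1 : List Char) (q : Int) (st : Int × Int × Int) (e : Int) : Int × Int × Int :=
  let c := (PySem.List.pyGet? n1 (q - e)).getD ' '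
  let l := st.1 + (PySem.Int.ofChars? [c]).getD 0
  if st.2.1 ≠ 0 ∧ c = '0' then (l, st.2.1, st.2.2 + 1) else (l, 0, st.2.2)

-- lines 2-20 of A: everything up to (and including) the three-way reassembly of n
def gdCore (l0 : List Char) : List Char :=
  let q : Int := PySem.List.len l0
  let n1 : List Char := '0' :: l0
  let tk : Int × Int := if (PySem.List.pyGet? n1 q).getD ' ' = '0' then (1, 1) else (0, 0)
  let st := (PySem.List.pyRange 1 q 1).foldl (gdStepA n1 q) (0, tk.1, tk.2)
  let l := PySem.Int.mod st.1 2
  let k := st.2.2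
  if l ≠ 0 ∧ k ≠ 0 then PySem.List.slice n1 (some 1) (some (-1)) ++ ['1']
  else if l = 0 ∧ k = 0 then PySem.List.slice n1 (some 1) (some (-1)) ++ ['0']
  else PySem.List.slice n1 (some 1) (some (-k - 2)) ++
       PySem.Int.toChars (1 - (PySem.Int.ofChars? [(PySem.List.pyGet? n1 (-k - 2)).getD ' ']).getD 0) ++
       PySem.List.slice n1 (some (-k - 1)) none

def g_down (n : String) : String :=
  let n2 := gdCore n.toList
  let n3 := if 1 < n2.length ∧ (PySem.List.pyGet? n2 0).getD ' ' = '0'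
            then PySem.List.slice n2 (some 1) none else n2
  String.ofList n3

-- ===== PORT B =====
-- is_boundary(t): t encodes the reflection boundary ('1' then zeros); [] unreachable under Pre_
def isBoundary (t : List Char) : Bool :=
  match t with
  | [] => false
  | c :: r => c == '1' && r.all (· == '0')

mutual
-- dec(s) of Source B
def decG : List Char → List Char
  | [] => []              -- Python B raises on ""; outside Pre_
  | [_] => ['0']
  | c :: t => if c == '0' then '0' :: decG t
              else if isBoundary t then '0' :: t else '1' :: incG t
-- inc(s) of Source B
def incG : List Char → List Char
  | [] => []              -- unreachable
  | [_] => ['1']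
  | c :: t => if c == '1' then '1' :: decG t
              else if isBoundary t then '1' :: t else '0' :: incG t
end

def g_down_alt (n : String) : String :=
  -- the guard is Source B's ValueError on a non-Gray-code string; "" is returned where
  -- Python raises (those inputs are outside Pre_)
  if n.toList.any (fun c => !(c == '0' || c == '1')) then ""
  else
    let s := decG n.toList
    let s2 := if 1 < s.length ∧ (PySem.List.pyGet? s 0).getD ' ' = '0'
              then PySem.List.slice s (some 1) none else s
    String.ofList s2

-- ===== PRECONDITION & SPEC =====
-- Pre_ excludes the empty string and strings with a char other than '0'/'1' (digits 2-9 make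
-- A's digit-sum parity meaningless for a Gray code, other chars raise ValueError), and
-- all-zero strings (Gray value 0: decrement underflows and A raises IndexError).
def Pre_g_down (n : String) : Prop :=
  n.toList ≠ [] ∧ n.toList.all (fun c => c == '0' || c == '1') = true ∧ '1' ∈ n.toList
instance (n : String) : Decidable (Pre_g_down n) := by unfold Pre_g_down; infer_instance

def pvWitness_g_down : String := "110"

def Spec_g_down (n : String) (out : String) : Prop := out = g_down_alt n
instance (n : String) (out : String) : Decidable (Spec_g_down n out) := by unfold Spec_g_down; infer_instance

-- ===== CLAIM (what is proved, stated in full; the proofs are below) =====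
def Claim_equal_g_down : Prop := ∀ (n : String), Dom_g_down n → Pre_g_down n → Spec_g_down n (g_down n)

-- ===== LEMMAS AND PROOFS =====

-- char flip '0' <-> '1'
def flipc (c : Char) : Char := if c = '1' then '0' else '1'
-- number of trailing '0' chars
def czero (s : List Char) : Nat := (s.reverse.takeWhile (· == '0')).length
-- flip the char at index i (the single-bit surgery both programs perform)
def flipAt (i : Nat) (s : List Char) : List Char :=
  s.take i ++ [flipc (s.getD i ' ')] ++ s.drop (i + 1)
-- the index both programs flip: last position when the bit-parity is odd,
-- else just left of the '1' that precedes the trailing zeros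
def decIdx (s : List Char) : Nat :=
  if s.count '1' % 2 = 1 then s.length - 1 else s.length - czero s - 2
def incIdx (s : List Char) : Nat :=
  if s.count '1' % 2 = 0 then s.length - 1 else s.length - czero s - 2

def Binary (s : List Char) : Prop := ∀ c ∈ s, c = '0' ∨ c = '1'

theorem mem_takeWhile_zero {l : List Char} {x : Char}
    (h : x ∈ l.takeWhile (· == '0')) : x = '0' := by
  have := List.mem_takeWhile_imp h
  simpa using this

theorem takeWhile_full_all {p : Char → Bool} {l : List Char}
    (h : (l.takeWhile p).length = l.length) : ∀ x ∈ l, p x := by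
  have hs : (l.takeWhile p).Sublist l := List.takeWhile_sublist p
  have : l.takeWhile p = l := hs.eq_of_length h
  intro x hx
  rw [← this] at hx
  exact List.mem_takeWhile_imp hx

theorem czero_append_zero (t : List Char) : czero (t ++ ['0']) = czero t + 1 := by
  simp [czero]

theorem czero_append_one (t : List Char) : czero (t ++ ['1']) = 0 := by
  simp [czero]

theorem czero_cons (c : Char) (t : List Char) (h1 : '1' ∈ t) : czero (c :: t) = czero t := by
  have hcond : ¬ ((t.reverse.takeWhile (· == '0')).length = t.reverse.length) := by
    intro h
    have hall := takeWhile_full_all h '1' (by simpa using h1)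
    simp at hall
  simp only [czero, List.reverse_cons, List.takeWhile_append, if_neg hcond]

-- decomposition at the trailing zeros
theorem czero_decomp (t : List Char) (h1 : '1' ∈ t) (hb : Binary t) :
    ∃ u, t = u ++ '1' :: List.replicate (czero t) '0' := by
  set p : Char → Bool := (· == '0') with hp
  have hsplit : t.reverse.takeWhile p ++ t.reverse.dropWhile p = t.reverse :=
    List.takeWhile_append_dropWhile
  have hdne : t.reverse.dropWhile p ≠ [] := by
    intro h
    rw [h, List.append_nil] at hsplit
    have hall := takeWhile_full_all (congrArg List.length hsplit) '1' (by simpa using h1)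
    simp [hp] at hall
  obtain ⟨d, ds, hd⟩ : ∃ d ds, t.reverse.dropWhile p = d :: ds :=
    List.exists_cons_of_ne_nil hdne
  have hdhead : p d = false := by
    have := List.head_dropWhile_not p hdne
    simpa [hd] using this
  have hd1 : d = '1' := by
    have hmem : d ∈ t := by
      have : d ∈ t.reverse.dropWhile p := by rw [hd]; exact List.mem_cons_self
      have := List.dropWhile_sublist (l := t.reverse) (p := p) |>.mem this
      simpa using this
    rcases hb d hmem with h | h
    · rw [h] at hdhead; simp [hp] at hdhead
    · exact h
  have htw : t.reverse.takeWhile p = List.replicate (czero t) '0' := by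
    have : ∀ x ∈ t.reverse.takeWhile p, x = '0' := fun x hx => mem_takeWhile_zero hx
    have := List.eq_replicate_of_mem this
    simpa [czero] using this
  refine ⟨ds.reverse, ?_⟩
  have : t.reverse = List.replicate (czero t) '0' ++ '1' :: ds := by
    rw [← hsplit, htw, hd, hd1]
  calc t = t.reverse.reverse := by rw [List.reverse_reverse]
    _ = (List.replicate (czero t) '0' ++ '1' :: ds).reverse := by rw [this]
    _ = ds.reverse ++ '1' :: List.replicate (czero t) '0' := by
        simp [List.reverse_append, List.reverse_cons, List.reverse_replicate, List.append_assoc]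

theorem isBoundary_eq_true (t : List Char) (h : isBoundary t = true) :
    t = '1' :: List.replicate (t.length - 1) '0' := by
  match t with
  | [] => simp [isBoundary] at h
  | c :: r =>
    simp only [isBoundary, Bool.and_eq_true, beq_iff_eq, List.all_eq_true] at h
    obtain ⟨hc, hr⟩ := h
    have : r = List.replicate r.length '0' :=
      List.eq_replicate_of_mem (fun x hx => by simpa using hr x hx)
    simp [hc, List.length_cons]
    exact this

theorem isBoundary_repl (m : Nat) : isBoundary ('1' :: List.replicate m '0') = true := by
  simp [isBoundary]

theorem czero_explicit (u : List Char) (k : Nat) :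
    czero (u ++ '1' :: List.replicate k '0') = k := by
  simp [czero, List.reverse_append, List.reverse_cons, List.reverse_replicate]

theorem czero_add_two_le (t : List Char) (hb : Binary t) (h1 : '1' ∈ t)
    (hnb : isBoundary t = false) : czero t + 2 ≤ t.length := by
  obtain ⟨u, hu⟩ := czero_decomp t h1 hb
  have hune : u ≠ [] := by
    intro h
    rw [h, List.nil_append] at hu
    rw [hu, isBoundary_repl] at hnb
    exact Bool.true_eq_false.mp hnb
  have : 1 ≤ u.length := List.length_pos_iff.mpr hune
  have hlen := congrArg List.length hu
  simp at hlen; omega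

theorem flipAt_cons_succ (i : Nat) (c : Char) (t : List Char) :
    flipAt (i + 1) (c :: t) = c :: flipAt i t := by
  simp [flipAt]

theorem count_one_boundary (m : Nat) : ('1' :: List.replicate m '0').count '1' = 1 := by
  simp [List.count_replicate]

theorem mem_one_of_count_ne (t : List Char) (h : t.count '1' % 2 = 1) : '1' ∈ t := by
  have : 0 < t.count '1' := by omega
  exact List.count_pos_iff.mp this

theorem not_boundary_of_even (t : List Char) (h : ¬ t.count '1' % 2 = 1) :
    isBoundary t = false := by
  cases hB : isBoundary t
  · rfl
  · have htb := isBoundary_eq_true t hB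
    rw [htb, count_one_boundary] at h
    omega

theorem czero_boundary (m : Nat) : czero ('1' :: List.replicate m '0') = m :=
  czero_explicit [] m

-- the joint characterisation of B's mutual recursion
theorem decG_incG_spec (N : Nat) : ∀ s : List Char, s.length ≤ N →
    (Binary s → '1' ∈ s → decG s = flipAt (decIdx s) s) ∧
    (Binary s → s ≠ [] → isBoundary s = false → incG s = flipAt (incIdx s) s) := by
  induction N with
  | zero =>
    intro s hs
    have : s = [] := List.eq_nil_of_length_eq_zero (by omega)
    subst this
    constructor
    · intro _ h1; simp at h1
    · intro _ hne _; exact absurd rfl hne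
  | succ N ih =>
    intro s hs
    match s with
    | [] =>
      constructor
      · intro _ h1; simp at h1
      · intro _ hne _; exact absurd rfl hne
    | [c] =>
      constructor
      · intro hb h1
        have hc : c = '1' := (List.mem_singleton.mp h1).symm
        subst hc; decide
      · intro hb hne hnb
        have hc : c = '0' := by
          rcases hb c List.mem_cons_self with h | h
          · exact h
          · subst h; simp [isBoundary] at hnb
        subst hc; decide
    | a :: b :: t0 =>
      set t := b :: t0 with hteq
      clear_value t
      have htne : t ≠ [] := by rw [hteq]; simp
      have htlen : t.length ≤ N := by
        rw [hteq] at hs ⊢; simp at hs ⊢; omega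
      have htpos : 1 ≤ t.length := List.length_pos_iff.mpr htne
      constructor
      · -- dec part
        intro hb h1
        have hbt : Binary t := fun c hc => hb c (List.mem_cons_of_mem a hc)
        rcases hb a List.mem_cons_self with ha | ha
        · -- a = '0' : dec = '0' :: dec t
          subst ha
          have h1t : '1' ∈ t := by
            rcases List.mem_cons.mp h1 with h | h
            · exact absurd h.symm (by decide)
            · exact h
          have hdec : decG ('0' :: t) = '0' :: decG t := by
            rw [hteq]; simp [decG]
          rw [hdec, (ih t htlen).1 hbt h1t]
          suffices hidx : decIdx ('0' :: t) = decIdx t + 1 by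
            rw [hidx, flipAt_cons_succ]
          have hc : ('0' :: t).count '1' = t.count '1' := by simp
          have hcz : czero ('0' :: t) = czero t := czero_cons _ t h1t
          have hbound : ¬ t.count '1' % 2 = 1 → czero t + 2 ≤ t.length := fun hp =>
            czero_add_two_le t hbt h1t (not_boundary_of_even t hp)
          simp only [decIdx, hc, hcz, List.length_cons]
          split_ifs with hpar
          · omega
          · have := hbound hpar; omega
        · -- a = '1'
          subst ha
          by_cases hbd : isBoundary t = true
          · -- t at the reflection boundary: dec = '0' :: t
            have htb := isBoundary_eq_true t hbd
            have hdec : decG ('1' :: t) = '0' :: t := by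
              rw [hteq] at hbd ⊢; simp [decG, hbd]
            rw [hdec]
            have h1t : '1' ∈ t := by rw [htb]; exact List.mem_cons_self
            have hc : ('1' :: t).count '1' = 2 := by
              rw [List.count_cons]
              conv_lhs => rw [htb, count_one_boundary]
              simp
            have hcz : czero ('1' :: t) = t.length - 1 := by
              rw [czero_cons _ t h1t]
              conv_lhs => rw [htb, czero_boundary]
            have hidx : decIdx ('1' :: t) = 0 := by
              simp only [decIdx, hc, hcz, List.length_cons]
              norm_num
              omega
            rw [hidx]
            simp [flipAt, flipc]
          · -- dec = '1' :: inc t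
            have hdec : decG ('1' :: t) = '1' :: incG t := by
              rw [hteq] at hbd ⊢; simp [decG, hbd]
            rw [hdec, (ih t htlen).2 hbt htne (by simpa using hbd)]
            suffices hidx : decIdx ('1' :: t) = incIdx t + 1 by
              rw [hidx, flipAt_cons_succ]
            have hc : ('1' :: t).count '1' = t.count '1' + 1 := by simp
            simp only [decIdx, incIdx, hc, List.length_cons]
            by_cases hpar : t.count '1' % 2 = 1
            · -- parity of t odd, parity of s even
              have h1t : '1' ∈ t := mem_one_of_count_ne t hpar
              have hcz : czero ('1' :: t) = czero t := czero_cons _ t h1t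
              have hbound : czero t + 2 ≤ t.length :=
                czero_add_two_le t hbt h1t (by simpa using hbd)
              rw [hcz]
              split_ifs <;> omega
            · split_ifs <;> omega
      · -- inc part
        intro hb hne hnb
        have hbt : Binary t := fun c hc => hb c (List.mem_cons_of_mem a hc)
        rcases hb a List.mem_cons_self with ha | ha
        · -- a = '0'
          subst ha
          by_cases hbd : isBoundary t = true
          · have htb := isBoundary_eq_true t hbd
            have hinc : incG ('0' :: t) = '1' :: t := by
              rw [hteq] at hbd ⊢; simp [incG, hbd]
            rw [hinc]
            have h1t : '1' ∈ t := by rw [htb]; exact List.mem_cons_self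
            have hc : ('0' :: t).count '1' = 1 := by
              rw [List.count_cons]
              conv_lhs => rw [htb, count_one_boundary]
              simp
            have hcz : czero ('0' :: t) = t.length - 1 := by
              rw [czero_cons _ t h1t]
              conv_lhs => rw [htb, czero_boundary]
            have hidx : incIdx ('0' :: t) = 0 := by
              simp only [incIdx, hc, hcz, List.length_cons]
              norm_num
              omega
            rw [hidx]
            simp [flipAt, flipc]
          · have hinc : incG ('0' :: t) = '0' :: incG t := by
              rw [hteq] at hbd ⊢; simp [incG, hbd]
            rw [hinc, (ih t htlen).2 hbt htne (by simpa using hbd)]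
            suffices hidx : incIdx ('0' :: t) = incIdx t + 1 by
              rw [hidx, flipAt_cons_succ]
            have hc : ('0' :: t).count '1' = t.count '1' := by simp
            simp only [incIdx, hc, List.length_cons]
            by_cases hpar : t.count '1' % 2 = 1
            · have h1t : '1' ∈ t := mem_one_of_count_ne t hpar
              have hcz : czero ('0' :: t) = czero t := czero_cons _ t h1t
              have hbound : czero t + 2 ≤ t.length :=
                czero_add_two_le t hbt h1t (by simpa using hbd)
              rw [hcz]
              split_ifs <;> omega
            · split_ifs <;> omega
        · -- a = '1': inc = '1' :: dec t, and t is not all zeros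
          subst ha
          have hinc : incG ('1' :: t) = '1' :: decG t := by
            rw [hteq]; simp [incG]
          have h1t : '1' ∈ t := by
            -- isBoundary ('1' :: t) = t.all (· == '0'), which is false
            have hnall : t.all (· == '0') = false := by simpa [isBoundary] using hnb
            obtain ⟨c, hc, hcp⟩ := List.all_eq_false.mp hnall
            rcases hbt c hc with h | h
            · simp [h] at hcp
            · exact h ▸ hc
          rw [hinc, (ih t htlen).1 hbt h1t]
          suffices hidx : incIdx ('1' :: t) = decIdx t + 1 by
            rw [hidx, flipAt_cons_succ]
          have hc : ('1' :: t).count '1' = t.count '1' + 1 := by simp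
          have hcz : czero ('1' :: t) = czero t := czero_cons _ t h1t
          have hbound : ¬ t.count '1' % 2 = 1 → czero t + 2 ≤ t.length := fun hp =>
            czero_add_two_le t hbt h1t (not_boundary_of_even t hp)
          simp only [incIdx, decIdx, hc, hcz, List.length_cons]
          by_cases hpar : t.count '1' % 2 = 1
          · split_ifs <;> omega
          · have := hbound hpar
            split_ifs <;> omega

theorem decG_spec (s : List Char) (hb : Binary s) (h1 : '1' ∈ s) :
    decG s = flipAt (decIdx s) s :=
  ((decG_incG_spec s.length s le_rfl).1) hb h1

-- ===== A-side characterisation =====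

-- A's loop body as a function of the scanned character
def cstep (st : Int × Int × Int) (c : Char) : Int × Int × Int :=
  let l := st.1 + (PySem.Int.ofChars? [c]).getD 0
  if st.2.1 ≠ 0 ∧ c = '0' then (l, st.2.1, st.2.2 + 1) else (l, 0, st.2.2)

theorem gdStepA_eq (n1 : List Char) (q : Int) (st : Int × Int × Int) (e : Int) :
    gdStepA n1 q st e = cstep st ((PySem.List.pyGet? n1 (q - e)).getD ' ') := rfl

-- generic re-indexing: a fold over range m reading l[m-1-k] is a fold over (l.take m).reverse
theorem foldl_range_rev {β : Type} (f : β → Char → β) (l : List Char) (d : Char) :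
    ∀ (m : Nat), m ≤ l.length → ∀ (st : β),
    (List.range m).foldl (fun st k => f st (l.getD (m - 1 - k) d)) st
      = ((l.take m).reverse).foldl f st := by
  intro m
  induction m with
  | zero => intro _ st; simp
  | succ m ih =>
    intro hm st
    rw [List.range_succ_eq_map, List.foldl_cons, List.foldl_map]
    have hfun : ∀ (st : β) (k : Nat), k ∈ List.range m →
        f st (l.getD (m + 1 - 1 - Nat.succ k) d) = f st (l.getD (m - 1 - k) d) := by
      intro st k _
      have h : m + 1 - 1 - Nat.succ k = m - 1 - k := by omega
      rw [h]
    rw [PySem.List.foldl_congr_mem _ _ _ _ hfun, ih (by omega)]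
    have hm' : m < l.length := by omega
    have ht : l.take (m + 1) = l.take m ++ [l[m]] := by
      rw [List.take_add_one, List.getElem?_eq_getElem hm']
      rfl
    have hg : l.getD (m + 1 - 1 - 0) d = l[m] := by
      have h : m + 1 - 1 - 0 = m := by omega
      rw [h, List.getD_eq_getElem?_getD, List.getElem?_eq_getElem hm']
      rfl
    rw [ht, hg, List.reverse_append, List.reverse_singleton, List.singleton_append,
        List.foldl_cons]

-- re-index A's range loop into a fold over the scanned characters
theorem loopA_reindex (l0 : List Char) (st : Int × Int × Int) :
    (PySem.List.pyRange 1 (PySem.List.len l0) 1).foldl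
        (gdStepA ('0' :: l0) (PySem.List.len l0)) st
      = (l0.dropLast.reverse).foldl cstep st := by
  simp only [PySem.List.len_eq]
  rw [PySem.List.pyRange_one]
  have hL : ((l0.length : Int) - 1).toNat = l0.length - 1 := by omega
  rw [hL, List.foldl_map]
  have hfun : ∀ (st : Int × Int × Int) (k : Nat), k ∈ List.range (l0.length - 1) →
      gdStepA ('0' :: l0) (l0.length : Int) st (1 + (k : Int))
        = cstep st (l0.getD (l0.length - 1 - 1 - k) ' ') := by
    intro st k hk
    have hk' : k < l0.length - 1 := List.mem_range.mp hk
    rw [gdStepA_eq]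
    congr 1
    have h1 : (l0.length : Int) - (1 + (k : Int)) = ((l0.length - 1 - k : Nat) : Int) := by
      omega
    rw [h1, PySem.List.pyGet?_natCast]
    have h2 : l0.length - 1 - k = (l0.length - 1 - 1 - k) + 1 := by omega
    rw [h2, List.getElem?_cons_succ]
    rw [List.getD_eq_getElem?_getD]
  rw [PySem.List.foldl_congr_mem _ _ _ _ hfun,
      foldl_range_rev cstep l0 ' ' (l0.length - 1) (by omega) st,
      ← List.dropLast_eq_take]

theorem ofChars_zero : (PySem.Int.ofChars? ['0']).getD 0 = 0 := by decide
theorem ofChars_one : (PySem.Int.ofChars? ['1']).getD 0 = 1 := by decide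

-- the loop with the trailing-zero flag already cleared: only the parity sum moves
theorem loop_t0 (cs : List Char) (hb : Binary cs) : ∀ (l k : Int),
    cs.foldl cstep (l, 0, k) = (l + (cs.count '1' : Int), 0, k) := by
  induction cs with
  | nil => intro l k; simp
  | cons c cs ih =>
    intro l k
    have hbt : Binary cs := fun x hx => hb x (List.mem_cons_of_mem c hx)
    rcases hb c List.mem_cons_self with hc | hc <;> subst hc
    · rw [List.foldl_cons]
      have : cstep (l, 0, k) '0' = (l + 0, 0, k) := by simp [cstep, ofChars_zero]
      rw [this, ih hbt, List.count_cons]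
      simp
    · rw [List.foldl_cons]
      have : cstep (l, 0, k) '1' = (l + 1, 0, k) := by simp [cstep, ofChars_one]
      rw [this, ih hbt, List.count_cons]
      simp only [Prod.mk.injEq, beq_self_eq_true, if_true, and_true]
      omega

-- the loop with the flag set: it also counts the leading zeros of the scanned list
theorem loop_t1 (cs : List Char) (hb : Binary cs) : ∀ (l k : Int),
    cs.foldl cstep (l, 1, k) =
      (l + (cs.count '1' : Int),
       if cs.all (· == '0') then 1 else 0,
       k + ((cs.takeWhile (· == '0')).length : Int)) := by
  induction cs with
  | nil => intro l k; simp
  | cons c cs ih =>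
    intro l k
    have hbt : Binary cs := fun x hx => hb x (List.mem_cons_of_mem c hx)
    rcases hb c List.mem_cons_self with hc | hc <;> subst hc
    · rw [List.foldl_cons]
      have : cstep (l, 1, k) '0' = (l + 0, 1, k + 1) := by simp [cstep, ofChars_zero]
      rw [this, ih hbt, List.count_cons, List.all_cons, List.takeWhile_cons]
      simp only [Prod.mk.injEq, beq_self_eq_true, if_true]
      refine ⟨by simp, by simp, by simp; omega⟩
    · rw [List.foldl_cons]
      have : cstep (l, 1, k) '1' = (l + 1, 0, k) := by simp [cstep, ofChars_one]
      rw [this, loop_t0 cs hbt, List.count_cons, List.all_cons, List.takeWhile_cons]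
      simp only [Prod.mk.injEq, beq_self_eq_true, if_true]
      refine ⟨by simp; omega, by simp, by simp⟩

-- slice / index evaluations on '0' :: l0
theorem slice_mid (l : List Char) :
    PySem.List.slice ('0' :: l) (some 1) (some (-1)) = l.dropLast := by
  simp [PySem.List.slice]
  rw [List.dropLast_eq_take]

theorem slice_head (l : List Char) (K : Nat) (hK : K + 2 ≤ l.length) :
    PySem.List.slice ('0' :: l) (some 1) (some (-(K : Int) - 2))
      = l.take (l.length - K - 2) := by
  have h : (-(K : Int) - 2) = -((K + 2 : Nat) : Int) := by push_cast; ring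
  rw [h, PySem.List.slice]
  rw [PySem.List.clampIdx_neg_natCast _ _ (by omega : 0 < K + 2)]
  have e1 : PySem.List.clampIdx (('0' :: l).length) 1 = 1 := by
    rw [show (1 : Int) = ((1 : Nat) : Int) from rfl, PySem.List.clampIdx_natCast]
    simp
  rw [e1]
  have e2 : ('0' :: l).length - (K + 2) - 1 = l.length - K - 2 := by simp; omega
  rw [e2, List.drop_one, List.tail_cons]

theorem slice_tail (l : List Char) (K : Nat) (hK : K + 1 ≤ l.length) :
    PySem.List.slice ('0' :: l) (some (-(K : Int) - 1)) none
      = l.drop (l.length - K - 1) := by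
  have h : (-(K : Int) - 1) = -((K + 1 : Nat) : Int) := by push_cast; ring
  rw [h, PySem.List.slice_from_neg_natCast _ (K + 1) (by omega)]
  have e : ('0' :: l).length - (K + 1) = (l.length - K - 1) + 1 := by simp; omega
  rw [e, List.drop_succ_cons]

theorem pyget_neg (l : List Char) (K : Nat) (hK : K + 2 ≤ l.length) :
    PySem.List.pyGet? ('0' :: l) (-(K : Int) - 2) = l[l.length - K - 2]? := by
  simp only [PySem.List.pyGet?, PySem.List.pyIdx?, List.length_cons]
  rw [if_neg (by omega), if_pos (by omega)]
  have e : l.length + 1 - (-(-(K : Int) - 2)).toNat = (l.length - K - 2) + 1 := by omega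
  rw [e]
  simp only [Option.bind_some, List.getElem?_cons_succ]

theorem getlast_eval (l : List Char) (hne : l ≠ []) :
    (PySem.List.pyGet? ('0' :: l) (PySem.List.len l)).getD ' '
      = l.getLast hne := by
  simp only [PySem.List.len_eq]
  rw [show ((l.length : Int)) = ((l.length : Nat) : Int) from rfl, PySem.List.pyGet?_natCast]
  have h : l.length = (l.length - 1) + 1 := by
    have := List.length_pos_iff.mpr hne; omega
  rw [h, List.getElem?_cons_succ, List.getLast_eq_getElem]
  rw [List.getElem?_eq_getElem (by omega)]
  rfl

theorem toChars_flip (c : Char) (hc : c = '0' ∨ c = '1') :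
    PySem.Int.toChars (1 - (PySem.Int.ofChars? [c]).getD 0) = [flipc c] := by
  rcases hc with h | h <;> subst h <;> decide

-- flipping the last character
theorem flip_last (l : List Char) (hne : l ≠ []) :
    flipAt (l.length - 1) l = l.dropLast ++ [flipc (l.getLast hne)] := by
  have hpos : 1 ≤ l.length := List.length_pos_iff.mpr hne
  have h1 : l.length - 1 + 1 = l.length := by omega
  rw [flipAt, h1, List.drop_length, List.append_nil, ← List.dropLast_eq_take]
  congr 2
  rw [List.getD_eq_getElem?_getD, List.getElem?_eq_getElem (by omega),
      List.getLast_eq_getElem]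
  rfl

-- A's branch-3 output is the single-bit flip left of the trailing-zero block
theorem branch3_eq (l0 : List Char) (hb : Binary l0) (h1 : '1' ∈ l0)
    (hcount : l0.count '1' % 2 = 0) :
    PySem.List.slice ('0' :: l0) (some 1) (some (-(czero l0 : Int) - 2)) ++
      PySem.Int.toChars (1 -
        (PySem.Int.ofChars? [(PySem.List.pyGet? ('0' :: l0)
          (-(czero l0 : Int) - 2)).getD ' ']).getD 0) ++
      PySem.List.slice ('0' :: l0) (some (-(czero l0 : Int) - 1)) none
    = flipAt (decIdx l0) l0 := by
  have hK : czero l0 + 2 ≤ l0.length :=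
    czero_add_two_le l0 hb h1 (not_boundary_of_even l0 (by omega))
  have hidx : decIdx l0 = l0.length - czero l0 - 2 := by
    rw [decIdx, if_neg (by omega)]
  have hlt : l0.length - czero l0 - 2 < l0.length := by omega
  have hget : PySem.List.pyGet? ('0' :: l0) (-(czero l0 : Int) - 2)
      = some (l0[l0.length - czero l0 - 2]'hlt) := by
    rw [pyget_neg l0 (czero l0) hK, List.getElem?_eq_getElem hlt]
  have hchar : l0[l0.length - czero l0 - 2]'hlt = '0' ∨
      l0[l0.length - czero l0 - 2]'hlt = '1' :=
    hb _ (List.getElem_mem hlt)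
  rw [slice_head l0 (czero l0) hK, slice_tail l0 (czero l0) (by omega), hget]
  simp only [Option.getD_some]
  rw [toChars_flip _ hchar, hidx, flipAt]
  congr 2
  · rw [List.getD_eq_getElem?_getD, List.getElem?_eq_getElem hlt]
    rfl
  · omega

-- ===== the assembled A-side core, case last character =====

theorem core_eq (l0 : List Char) (hb : Binary l0) (hne : l0 ≠ []) (h1 : '1' ∈ l0) :
    gdCore l0 = flipAt (decIdx l0) l0 := by
  unfold gdCore
  simp only [getlast_eval l0 hne, loopA_reindex]
  have hbd : Binary l0.dropLast.reverse := by
    intro c hc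
    exact List.Sublist.mem (by simpa using hc) (List.dropLast_sublist l0) |> hb c
  have hsplit : l0.dropLast ++ [l0.getLast hne] = l0 := List.dropLast_append_getLast hne
  have hcz : czero l0.dropLast = (l0.dropLast.reverse.takeWhile (· == '0')).length := rfl
  have hcnt : l0.dropLast.reverse.count '1' = l0.dropLast.count '1' := List.count_reverse
  have hmod : ∀ (a : Nat), PySem.Int.mod ((a : Nat) : Int) 2 = ((a % 2 : Nat) : Int) := by
    intro a; exact_mod_cast PySem.Int.mod_natCast a 2
  rcases hb _ (List.getLast_mem hne) with hlast | hlast <;> rw [hlast]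
  · -- last char '0': flag and k start at 1
    rw [if_pos rfl]
    simp only [loop_t1 _ hbd, hcnt, ← hcz, zero_add, hmod]
    have hc0 : l0.count '1' = l0.dropLast.count '1' := by
      conv_lhs => rw [← hsplit]
      rw [List.count_append, hlast]
      simp
    have hk0 : czero l0 = czero l0.dropLast + 1 := by
      conv_lhs => rw [← hsplit, hlast]
      rw [czero_append_zero]
    by_cases hpar : l0.dropLast.count '1' % 2 = 1
    · -- parity odd: branch 1 flips the last character ('0' becomes '1')
      have hl1 : ((l0.dropLast.count '1' % 2 : Nat) : Int) = 1 := by omega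
      rw [hl1]
      have hidx : decIdx l0 = l0.length - 1 := by
        rw [decIdx, if_pos (by omega)]
      split_ifs with hA hB
      · rw [slice_mid, hidx, flip_last l0 hne, hlast]
        rfl
      · exact absurd ⟨by decide, by omega⟩ hA
      · exact absurd ⟨by decide, by omega⟩ hA
    · -- parity even: branch 3
      have hl0' : ((l0.dropLast.count '1' % 2 : Nat) : Int) = 0 := by omega
      rw [hl0']
      have ek : (1 : Int) + ((czero l0.dropLast : Nat) : Int) = ((czero l0 : Nat) : Int) := by
        rw [hk0]; push_cast; ring
      split_ifs with hA hB
      · exact absurd hA (by rintro ⟨h, -⟩; exact h rfl)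
      · exact absurd hB (by rintro ⟨-, h⟩; omega)
      · rw [ek]
        exact branch3_eq l0 hb h1 (by omega)
  · -- last char '1': flag and k start at 0
    rw [if_neg (show ¬('1' : Char) = '0' by decide)]
    simp only [loop_t0 _ hbd, hcnt, zero_add, hmod]
    have hc0 : l0.count '1' = l0.dropLast.count '1' + 1 := by
      conv_lhs => rw [← hsplit]
      rw [List.count_append, hlast]
      simp
    have hk0 : czero l0 = 0 := by
      conv_lhs => rw [← hsplit, hlast]
      rw [czero_append_one]
    by_cases hpar : l0.dropLast.count '1' % 2 = 1
    · -- count of l0 even: branch 3 with k = 0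
      have hl1 : ((l0.dropLast.count '1' % 2 : Nat) : Int) = 1 := by omega
      rw [hl1]
      have h3 := branch3_eq l0 hb h1 (by omega)
      rw [hk0] at h3
      push_cast at h3
      split_ifs with hA hB
      · exact absurd hA (by rintro ⟨-, h⟩; exact h rfl)
      · exact absurd hB (by rintro ⟨h, -⟩; exact absurd h (by decide))
      · simpa using h3
    · -- count of l0 odd: branch 2 flips the last character ('1' becomes '0')
      have hl0' : ((l0.dropLast.count '1' % 2 : Nat) : Int) = 0 := by omega
      rw [hl0']
      have hidx : decIdx l0 = l0.length - 1 := by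
        rw [decIdx, if_pos (by omega)]
      split_ifs with hA hB
      · exact absurd hA (by rintro ⟨h, -⟩; exact h rfl)
      · rw [slice_mid, hidx, flip_last l0 hne, hlast]
        rfl
      · exact absurd (by simp) hB

-- ===== VERDICT (by name: the statement is the Claim_ definition above) =====
theorem g_down_spec : Claim_equal_g_down := by
  intro n _ hpre
  obtain ⟨hne, hball, h1⟩ := hpre
  have hb : Binary n.toList := by
    intro c hc
    have := List.all_eq_true.mp hball c hc
    simpa using this
  show g_down n = g_down_alt n
  unfold g_down g_down_alt
  have hany : n.toList.any (fun c => !(c == '0' || c == '1')) = false := by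
    rw [List.any_eq_false]
    intro c hc
    rcases hb c hc with h | h <;> simp [h]
  rw [hany]
  simp only [Bool.false_eq_true, if_false]
  rw [core_eq n.toList hb hne h1, ← decG_spec n.toList hb h1]
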